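-- pv_equiv track=rewrite | github.com/dobrso/AaDS | Classworks/11.04.2025 CW/Task 1.py | countCBS
-- ===== SOURCE A (Python) =====
-- def countCBS(string: str) -> int:
--     openCount = 0
--     removals = 0
--
--     for i in string:
--         if i == "(":
--             openCount += 1
--         else:
--             if openCount > 0:
--                 openCount -= 1
--             else:
--                 removals += 1
--
--     needToRemove = removals + openCount
--     return needToRemove
-- ===== SOURCE B (Python) =====
-- def countCBS(string: str) -> int:
--     prefix = [0]
--     for ch in string:
--         prefix.append(prefix[-1] + (1 if ch == "(" else -1))
--     return prefix[-1] - 2 * min(prefix)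
-- ===== Notes on version B (the rewrite author's own statement) =====
-- stated objective: alternative
-- what changed: Instead of A's clamped open/removal counters, B materialises the full list of signed prefix balances and returns the closed form last - 2*min(prefix); unmatched closes are -min and unmatched opens are last - min.
import Mathlib
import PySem

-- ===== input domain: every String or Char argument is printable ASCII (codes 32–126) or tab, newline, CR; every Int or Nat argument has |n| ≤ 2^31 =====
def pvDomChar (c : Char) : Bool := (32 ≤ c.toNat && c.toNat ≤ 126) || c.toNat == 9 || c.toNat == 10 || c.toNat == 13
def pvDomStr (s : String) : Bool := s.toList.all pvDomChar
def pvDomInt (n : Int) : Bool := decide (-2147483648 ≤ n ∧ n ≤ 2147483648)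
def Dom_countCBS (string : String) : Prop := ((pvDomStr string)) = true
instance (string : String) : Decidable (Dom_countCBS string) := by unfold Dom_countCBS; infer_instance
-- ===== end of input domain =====

-- B replaces A's clamped open/removal counters with a materialised list of signed
-- prefix balances, returning the closed form last - 2*min(prefix) (alternative).


-- ===== PORT A =====
-- fold state: (openCount, removals), transcribed from A's loop
def countCBS (string : String) : Int :=
  let st := string.toList.foldl
    (fun (st : Int × Int) (i : Char) =>
      if i = '(' then (st.1 + 1, st.2)
      else if st.1 > 0 then (st.1 - 1, st.2)
      else (st.1, st.2 + 1))
    (0, 0)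
  st.2 + st.1

-- ===== PORT B =====
-- the appended tail of the prefix-balance list; `acc` carries prefix[-1]
def cbsPrefix : List Char → Int → List Int
  | [], _ => []
  | ch :: t, acc =>
    let v := acc + (if ch = '(' then (1 : Int) else -1)
    v :: cbsPrefix t v

def countCBS_alt (string : String) : Int :=
  let prefix_ := (0 : Int) :: cbsPrefix string.toList 0
  ((PySem.List.pyGet? prefix_ (-1)).getD 0)
    - 2 * ((PySem.List.min? prefix_ (fun y => y)).getD 0)

-- ===== PRECONDITION & SPEC =====
def Spec_countCBS (string : String) (out : Int) : Prop := out = countCBS_alt string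
instance (string : String) (out : Int) : Decidable (Spec_countCBS string out) := by unfold Spec_countCBS; infer_instance

-- ===== CLAIM (what is proved, stated in full; the proofs are below) =====
def Claim_equal_countCBS : Prop := ∀ (string : String), Dom_countCBS string → Spec_countCBS string (countCBS string)

-- ===== LEMMAS AND PROOFS =====

-- A's fold started at (acc - mn, -mn) lands at (L - M, -M), where L is the last
-- prefix balance and M the minimum of mn and all prefix balances of l from acc.
theorem countCBS_fold_link (l : List Char) (acc mn : Int) (h0 : mn ≤ 0) (hr : mn ≤ acc) :
    l.foldl
      (fun (st : Int × Int) (i : Char) =>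
        if i = '(' then (st.1 + 1, st.2)
        else if st.1 > 0 then (st.1 - 1, st.2)
        else (st.1, st.2 + 1))
      (acc - mn, -mn)
    = ((cbsPrefix l acc).getLastD acc - (cbsPrefix l acc).foldl min mn,
       -((cbsPrefix l acc).foldl min mn)) ∧
    (cbsPrefix l acc).foldl min mn ≤ 0 ∧
    (cbsPrefix l acc).foldl min mn ≤ (cbsPrefix l acc).getLastD acc := by
  induction l generalizing acc mn with
  | nil => refine ⟨by simp [cbsPrefix], by simpa [cbsPrefix] using h0, by simpa [cbsPrefix] using hr⟩
  | cons c t ih =>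
    simp only [cbsPrefix, List.foldl_cons, List.getLastD_cons]
    by_cases hc : c = '('
    · have hmin : min mn (acc + 1) = mn := by omega
      have := ih (acc + 1) mn h0 (by omega)
      simp only [hc, reduceIte, hmin]
      have harg : acc - mn + 1 = acc + 1 - mn := by ring
      rw [harg]
      exact this
    · by_cases hpos : acc - mn > 0
      · have hmin : min mn (acc + -1) = mn := by omega
        have := ih (acc + -1) mn h0 (by omega)
        simp only [if_neg hc, if_pos hpos, hmin]
        have harg : acc - mn - 1 = acc + -1 - mn := by ring
        rw [harg]
        exact this
      · -- here acc = mn: the new balance dips below the old minimum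
        have hmin : min mn (acc + -1) = acc + -1 := by omega
        have := ih (acc + -1) (acc + -1) (by omega) le_rfl
        simp only [if_neg hc, if_neg hpos, hmin]
        have h1 : acc - mn = acc + -1 - (acc + -1) := by omega
        have h2 : -mn + 1 = -(acc + -1) := by omega
        rw [h1, h2]
        exact this

-- ===== VERDICT (by name: the statement is the Claim_ definition above) =====
theorem countCBS_spec : Claim_equal_countCBS := by
  intro s _
  unfold Spec_countCBS countCBS countCBS_alt
  have h := countCBS_fold_link s.toList 0 0 le_rfl le_rfl
  rcases h with ⟨heq, hle, _⟩
  simp only [sub_zero, neg_zero] at heq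
  simp only [heq, PySem.List.pyGet?_neg_one, PySem.List.min?_id_cons,
    List.getLast?_cons, Option.getD_some]
  rw [← List.getLastD_eq_getLast?]
  ring
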